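-- pv_equiv track=rewrite | github.com/uvsq21800801/GraphesMoleculaires | Solving_Methods/Statistic.py | Tri_indice
-- ===== SOURCE A (Python) =====
-- def Tri_indice(lst_id, dict_stat):
--     tri_indice = []
--     # liste des couples de donnée { occurrence : [[indice, taux]] }
--     d = {}
--     # pour chaque indice (de certificat/ de motif)
--     for i in lst_id:
--         tmp = dict_stat.get(i)
--         if tmp[0] not in d.keys():
--             d[tmp[0]] = [[i, tmp[2]]]
--         else :
--             d[tmp[0]].append([i, tmp[2]])
--
--     # pour tous les nombres d'occurrence triés
--     for k in sorted(d.keys()) :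
--         # récupère la liste des couples [indice, taux]
--         tmp = d.get(k)
--         # pour tous les couples triés selon le taux
--         for l in sorted(tmp, key=second):
--             tri_indice.append(l[0])
--
--     return tri_indice
--
-- def second(tab):
--     return tab[1]
-- ===== SOURCE B (Python) =====
-- def Tri_indice(lst_id, dict_stat):
--     # single stable sort on the compound key (occurrence, taux)
--     return sorted(lst_id, key=lambda i: (dict_stat.get(i)[0], dict_stat.get(i)[2]))
-- ===== Notes on version B (the rewrite author's own statement) =====
-- stated objective: simpler
-- what changed: Replaced the occurrence-keyed grouping dict plus per-group taux sort with one stable sort of lst_id on the compound key (occurrence, taux).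
import Mathlib
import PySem

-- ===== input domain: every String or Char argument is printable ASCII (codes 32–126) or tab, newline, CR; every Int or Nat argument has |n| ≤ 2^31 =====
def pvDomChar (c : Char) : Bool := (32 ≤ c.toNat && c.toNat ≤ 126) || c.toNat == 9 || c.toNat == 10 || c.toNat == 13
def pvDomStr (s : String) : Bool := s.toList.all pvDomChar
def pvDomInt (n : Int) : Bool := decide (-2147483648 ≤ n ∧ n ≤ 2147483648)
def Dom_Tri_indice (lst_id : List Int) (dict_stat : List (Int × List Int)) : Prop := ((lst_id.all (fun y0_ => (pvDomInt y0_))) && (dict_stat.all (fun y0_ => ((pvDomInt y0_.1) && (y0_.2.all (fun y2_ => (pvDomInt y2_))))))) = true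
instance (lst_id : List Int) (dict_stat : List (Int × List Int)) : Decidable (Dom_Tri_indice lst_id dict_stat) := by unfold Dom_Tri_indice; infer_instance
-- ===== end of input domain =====

-- B replaces A's occurrence-keyed grouping dict + per-group taux sort with one stable sort
-- of lst_id on the compound key (occurrence, taux); same return value, no mutation either way.

-- ===== PORT A =====
-- helper 'second(tab) = tab[1]' from the Python module
def pvSecond (tab : Int × Int) : Int := tab.2

def Tri_indice (lst_id : List Int) (dict_stat : List (Int × List Int)) : List Int :=
  -- d = {}; for i in lst_id: tmp = dict_stat.get(i); group (i, tmp[2]) under key tmp[0]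
  let d : PySem.Dict Int (List (Int × Int)) :=
    lst_id.foldl (fun d i =>
      let tmp := PySem.Dict.getD ⟨dict_stat⟩ i []
      if (d.keys.contains (PySem.List.pyGetD tmp 0 0)) = false then
        d.insert (PySem.List.pyGetD tmp 0 0) [(i, PySem.List.pyGetD tmp 2 0)]
      else
        d.modify (PySem.List.pyGetD tmp 0 0) [] (fun l => l ++ [(i, PySem.List.pyGetD tmp 2 0)])) PySem.Dict.empty
  -- for k in sorted(d.keys()): for l in sorted(d.get(k), key=second): tri_indice.append(l[0])
  (PySem.List.sorted d.keys (fun k => k) false).foldl (fun acc k =>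
    let tmp := PySem.Dict.getD d k []
    (PySem.List.sorted tmp pvSecond false).foldl (fun acc l => acc ++ [l.1]) acc) []

-- ===== PORT B =====
-- return sorted(lst_id, key=lambda i: (dict_stat.get(i)[0], dict_stat.get(i)[2]))
def Tri_indice_alt (lst_id : List Int) (dict_stat : List (Int × List Int)) : List Int :=
  PySem.List.sorted2 lst_id
    (fun i => PySem.List.pyGetD (PySem.Dict.getD ⟨dict_stat⟩ i []) 0 0)
    (fun i => PySem.List.pyGetD (PySem.Dict.getD ⟨dict_stat⟩ i []) 2 0) false

-- ===== PRECONDITION & SPEC =====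
-- Pre_ excludes exactly the inputs on which A raises: an index of lst_id missing from
-- dict_stat (TypeError on tmp[0]) or mapped to a list of length < 3 (IndexError on tmp[2]).
def Pre_Tri_indice (lst_id : List Int) (dict_stat : List (Int × List Int)) : Prop :=
  ∀ i ∈ lst_id, 3 ≤ (PySem.Dict.getD ⟨dict_stat⟩ i ([] : List Int)).length
instance (lst_id : List Int) (dict_stat : List (Int × List Int)) : Decidable (Pre_Tri_indice lst_id dict_stat) := by unfold Pre_Tri_indice; infer_instance

def pvWitness_Tri_indice : List Int × (List (Int × List Int)) :=
  ([1, 2, 1], [(1, [2, 0, 5]), (2, [1, 0, 3])])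

def Spec_Tri_indice (lst_id : List Int) (dict_stat : List (Int × List Int)) (out : List Int) : Prop := out = Tri_indice_alt lst_id dict_stat
instance (lst_id : List Int) (dict_stat : List (Int × List Int)) (out : List Int) : Decidable (Spec_Tri_indice lst_id dict_stat out) := by unfold Spec_Tri_indice; infer_instance

-- ===== CLAIM (what is proved, stated in full; the proofs are below) =====
def Claim_equal_Tri_indice : Prop := ∀ (lst_id : List Int) (dict_stat : List (Int × List Int)), Dom_Tri_indice lst_id dict_stat → Pre_Tri_indice lst_id dict_stat → Spec_Tri_indice lst_id dict_stat (Tri_indice lst_id dict_stat)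

-- ===== LEMMAS AND PROOFS =====

-- occurrence key and taux key of an index i under dict_stat ds
def pvKo (ds : List (Int × List Int)) (i : Int) : Int := PySem.List.pyGetD (PySem.Dict.getD ⟨ds⟩ i []) 0 0
def pvKt (ds : List (Int × List Int)) (i : Int) : Int := PySem.List.pyGetD (PySem.Dict.getD ⟨ds⟩ i []) 2 0

-- the compound-key "before" test used by sorted2
def pvLt2 (ds : List (Int × List Int)) (a b : Int) : Bool :=
  decide (pvKo ds a < pvKo ds b) || (!decide (pvKo ds b < pvKo ds a) && decide (pvKt ds a < pvKt ds b))

-- distinct occurrence values, in order of first appearance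
def pvOccs (ds : List (Int × List Int)) (xs : List Int) : List Int :=
  xs.foldl (fun acc i => if pvKo ds i ∈ acc then acc else acc ++ [pvKo ds i]) []

-- the group stored under occurrence o
def pvGrp (ds : List (Int × List Int)) (xs : List Int) (o : Int) : List (Int × Int) :=
  (xs.filter (fun i => decide (pvKo ds i = o))).map (fun i => (i, pvKt ds i))

theorem pvOccs_mem (ds : List (Int × List Int)) (xs : List Int) :
    ∀ acc a, a ∈ xs.foldl (fun acc i => if pvKo ds i ∈ acc then acc else acc ++ [pvKo ds i]) acc ↔
      a ∈ acc ∨ ∃ i ∈ xs, pvKo ds i = a := by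
  induction xs with
  | nil => simp
  | cons x xs ih =>
    intro acc a
    simp only [List.foldl_cons]
    by_cases h : pvKo ds x ∈ acc
    · simp only [if_pos h, ih]
      constructor
      · rintro (ha | ⟨i, hi, rfl⟩)
        · exact Or.inl ha
        · exact Or.inr ⟨i, List.mem_cons_of_mem _ hi, rfl⟩
      · rintro (ha | ⟨i, hi, rfl⟩)
        · exact Or.inl ha
        · rcases List.mem_cons.1 hi with rfl | hi
          · exact Or.inl h
          · exact Or.inr ⟨i, hi, rfl⟩
    · simp only [if_neg h, ih, List.mem_append, List.mem_singleton]
      constructor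
      · rintro ((ha | rfl) | ⟨i, hi, rfl⟩)
        · exact Or.inl ha
        · exact Or.inr ⟨x, List.mem_cons_self, rfl⟩
        · exact Or.inr ⟨i, List.mem_cons_of_mem _ hi, rfl⟩
      · rintro (ha | ⟨i, hi, rfl⟩)
        · exact Or.inl (Or.inl ha)
        · rcases List.mem_cons.1 hi with rfl | hi
          · exact Or.inl (Or.inr rfl)
          · exact Or.inr ⟨i, hi, rfl⟩

theorem pvOccs_mem' (ds : List (Int × List Int)) (xs : List Int) (a : Int) :
    a ∈ pvOccs ds xs ↔ ∃ i ∈ xs, pvKo ds i = a := by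
  rw [pvOccs, pvOccs_mem]; simp

theorem pvOccs_nodup (ds : List (Int × List Int)) (xs : List Int) :
    ∀ acc : List Int, acc.Nodup → (xs.foldl (fun acc i => if pvKo ds i ∈ acc then acc else acc ++ [pvKo ds i]) acc).Nodup := by
  induction xs with
  | nil => simpa using fun acc h => h
  | cons x xs ih =>
    intro acc hacc
    simp only [List.foldl_cons]
    by_cases h : pvKo ds x ∈ acc
    · rw [if_pos h]; exact ih acc hacc
    · rw [if_neg h]
      refine ih _ (List.Nodup.append hacc (List.nodup_singleton _) ?_)
      intro a ha hb
      exact h (List.mem_singleton.1 hb ▸ ha)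

theorem pvOccs_nodup' (ds : List (Int × List Int)) (xs : List Int) : (pvOccs ds xs).Nodup :=
  pvOccs_nodup ds xs [] List.nodup_nil

-- find? of a self-beq over a list containing a
theorem pvFind_beq_self {a : Int} {l : List Int} (h : a ∈ l) :
    l.find? (fun b => b == a) = some a := by
  induction l with
  | nil => simp at h
  | cons b l ih =>
    rcases List.mem_cons.1 h with rfl | h
    · simp
    · by_cases hb : b = a
      · subst hb; simp
      · rw [List.find?_cons_of_neg (by simp [hb])]
        exact ih h

-- A's grouping step, written with the occurrence/taux keys
def pvStep (ds : List (Int × List Int)) (d : PySem.Dict Int (List (Int × Int))) (i : Int) : PySem.Dict Int (List (Int × Int)) :=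
  if (d.keys.contains (pvKo ds i)) = false then
    d.insert (pvKo ds i) [(i, pvKt ds i)]
  else
    d.modify (pvKo ds i) [] (fun l => l ++ [(i, pvKt ds i)])

theorem pvBuildGetD (ds : List (Int × List Int)) (xs : List Int) (k : Int)
    (hmem : k ∈ pvOccs ds xs)
    (ih : (List.foldl (pvStep ds) PySem.Dict.empty xs).items = (pvOccs ds xs).map (fun o => (o, pvGrp ds xs o))) :
    PySem.Dict.getD (List.foldl (pvStep ds) PySem.Dict.empty xs) k [] = pvGrp ds xs k := by
  simp only [PySem.Dict.getD, PySem.Dict.get?, ih, List.find?_map]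
  have : ((pvOccs ds xs).find? ((fun p => p.1 == k) ∘ (fun o => (o, pvGrp ds xs o)))) = some k := by
    simpa [Function.comp] using pvFind_beq_self hmem
  rw [this]; rfl

-- the dict built by A's first loop, characterised
theorem pvBuild_items (ds : List (Int × List Int)) (xs : List Int) :
    (List.foldl (pvStep ds) PySem.Dict.empty xs).items = (pvOccs ds xs).map (fun o => (o, pvGrp ds xs o)) := by
  induction xs using List.reverseRecOn with
  | nil => simp [pvOccs, PySem.Dict.empty]
  | append_singleton xs x ih =>
    rw [List.foldl_append, List.foldl_cons, List.foldl_nil]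
    have hkeys : (List.foldl (pvStep ds) PySem.Dict.empty xs).keys = pvOccs ds xs := by
      simp [PySem.Dict.keys, ih, List.map_map, Function.comp_def]
    have hocc : pvOccs ds (xs ++ [x]) =
        if pvKo ds x ∈ pvOccs ds xs then pvOccs ds xs else pvOccs ds xs ++ [pvKo ds x] := by
      simp [pvOccs, List.foldl_append]
    rw [pvStep, hkeys]
    by_cases hmem : pvKo ds x ∈ pvOccs ds xs
    · -- existing occurrence: Python takes the append (modify) branch
      rw [if_neg (by simp [List.contains_iff_mem, hmem])]
      rw [PySem.Dict.modify, pvBuildGetD ds xs (pvKo ds x) hmem ih]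
      rw [PySem.Dict.insert]
      rw [if_pos (by
        simp only [PySem.Dict.contains, ih, List.any_map, Function.comp]
        exact List.any_eq_true.2 ⟨pvKo ds x, hmem, by simp⟩)]
      simp only [ih, List.map_map]
      rw [hocc, if_pos hmem]
      apply List.map_congr_left
      intro o ho
      by_cases hox : o = pvKo ds x
      · subst hox
        have : pvGrp ds (xs ++ [x]) (pvKo ds x) = pvGrp ds xs (pvKo ds x) ++ [(x, pvKt ds x)] := by
          simp [pvGrp, List.filter_append]
        simp [Function.comp, this]
      · have : pvGrp ds (xs ++ [x]) o = pvGrp ds xs o := by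
          simp [pvGrp, List.filter_append, Ne.symm hox]
        simp [Function.comp, hox, this]
    · -- new occurrence: Python takes the insert branch
      rw [if_pos (by simp [List.contains_iff_mem, hmem])]
      rw [PySem.Dict.insert]
      rw [if_neg (by
        simp only [PySem.Dict.contains, ih, List.any_map, Function.comp]
        intro hany
        rcases List.any_eq_true.1 hany with ⟨o, ho, hbeq⟩
        exact hmem (by simpa using (eq_of_beq hbeq) ▸ ho))]
      rw [hocc, if_neg hmem, List.map_append, ih]
      show List.map (fun o => (o, pvGrp ds xs o)) (pvOccs ds xs) ++ [(pvKo ds x, [(x, pvKt ds x)])] = _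
      congr 1
      · apply List.map_congr_left
        intro o ho
        have hox : pvKo ds x ≠ o := fun h => hmem (h ▸ ho)
        have : pvGrp ds (xs ++ [x]) o = pvGrp ds xs o := by
          simp [pvGrp, List.filter_append, hox]
        rw [this]
      · have : pvGrp ds (xs ++ [x]) (pvKo ds x) = [(x, pvKt ds x)] := by
          simp only [pvGrp, List.filter_append]
          rw [List.filter_eq_nil_iff.2 (fun i hi hdec =>
            hmem ((pvOccs_mem' ds xs _).2 ⟨i, hi, by simpa using hdec⟩))]
          simp
        simp [this]

-- insertBy helper lemmas
theorem pvInsertBy_all_true {α : Type} (bf : α → α → Bool) (x : α) (l : List α)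
    (h : ∀ a ∈ l, bf x a = true) : PySem.List.insertBy bf x l = x :: l := by
  cases l with
  | nil => rfl
  | cons y l => simp [PySem.List.insertBy, h y List.mem_cons_self]

theorem pvInsertBy_append_all_false {α : Type} (bf : α → α → Bool) (x : α) (l1 l2 : List α)
    (h : ∀ a ∈ l1, bf x a = false) :
    PySem.List.insertBy bf x (l1 ++ l2) = l1 ++ PySem.List.insertBy bf x l2 := by
  induction l1 with
  | nil => simp
  | cons y l1 ih =>
    simp only [List.cons_append, PySem.List.insertBy, h y List.mem_cons_self]
    simp [ih (fun a ha => h a (List.mem_cons_of_mem _ ha))]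

theorem pvInsertBy_append_all_true_right {α : Type} (bf : α → α → Bool) (x : α) (l1 l2 : List α)
    (h : ∀ a ∈ l2, bf x a = true) :
    PySem.List.insertBy bf x (l1 ++ l2) = PySem.List.insertBy bf x l1 ++ l2 := by
  induction l1 with
  | nil => simp [pvInsertBy_all_true bf x l2 h, PySem.List.insertBy]
  | cons y l1 ih =>
    by_cases hy : bf x y = true
    · simp [PySem.List.insertBy, hy]
    · simp only [List.cons_append, PySem.List.insertBy, Bool.not_eq_true] at *
      simp [hy, ih]

theorem pvInsertBy_congr_mem {α : Type} (bf bf' : α → α → Bool) (x : α) (l : List α)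
    (h : ∀ a ∈ l, bf x a = bf' x a) :
    PySem.List.insertBy bf x l = PySem.List.insertBy bf' x l := by
  induction l with
  | nil => rfl
  | cons y l ih =>
    simp only [PySem.List.insertBy, h y List.mem_cons_self]
    rw [ih (fun a ha => h a (List.mem_cons_of_mem _ ha))]

-- mapping a list through g commutes with insertion sort when the key factors through g
theorem pvInsertBy_map {α β : Type} (g : α → β) (bf : β → β → Bool) (bf' : α → α → Bool)
    (hb : ∀ a b, bf (g a) (g b) = bf' a b) (x : α) (l : List α) :
    PySem.List.insertBy bf (g x) (l.map g) = (PySem.List.insertBy bf' x l).map g := by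
  induction l with
  | nil => rfl
  | cons y l ih =>
    simp only [List.map_cons, PySem.List.insertBy, hb]
    by_cases h : bf' x y = true
    · simp [h]
    · simp only [Bool.not_eq_true] at h
      simp [h, ih]

theorem pvSorted_map {α β κ : Type} [LT κ] [DecidableLT κ] (g : α → β) (key : β → κ) (l : List α) :
    PySem.List.sorted (l.map g) key false = (PySem.List.sorted l (fun a => key (g a)) false).map g := by
  rw [PySem.List.sorted_eq_foldl_insertBy, PySem.List.sorted_eq_foldl_insertBy]
  rw [List.foldl_map]
  suffices h : ∀ (acc : List α),
      l.foldl (fun acc a => PySem.List.insertBy (fun a b => decide (key a < key b)) (g a) acc) (acc.map g)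
        = (l.foldl (fun acc a => PySem.List.insertBy (fun a b => decide (key (g a) < key (g b))) a acc) acc).map g by
    simpa using h []
  induction l with
  | nil => intro acc; rfl
  | cons y l ih =>
    intro acc
    simp only [List.foldl_cons]
    rw [pvInsertBy_map g (fun a b => decide (key a < key b)) (fun a b => decide (key (g a) < key (g b))) (fun _ _ => rfl)]
    exact ih _

-- A's output, as a flatMap over the sorted distinct occurrences of per-occurrence taux-sorts
theorem pvA_char (ds : List (Int × List Int)) (xs : List Int) :
    Tri_indice xs ds = (PySem.List.sorted (pvOccs ds xs) (fun k => k) false).flatMap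
      (fun o => PySem.List.sorted (xs.filter (fun i => decide (pvKo ds i = o))) (pvKt ds) false) := by
  have h0 : Tri_indice xs ds =
      (PySem.List.sorted (List.foldl (pvStep ds) PySem.Dict.empty xs).keys (fun k => k) false).foldl
        (fun acc k =>
          (PySem.List.sorted (PySem.Dict.getD (List.foldl (pvStep ds) PySem.Dict.empty xs) k []) pvSecond false).foldl
            (fun acc l => acc ++ [l.1]) acc) [] := rfl
  rw [h0]
  have hkeys : (List.foldl (pvStep ds) PySem.Dict.empty xs).keys = pvOccs ds xs := by
    simp [PySem.Dict.keys, pvBuild_items, List.map_map, Function.comp_def]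
  rw [hkeys]
  have hbody : ∀ (acc : List Int), ∀ k ∈ PySem.List.sorted (pvOccs ds xs) (fun k => k) false,
      (PySem.List.sorted (PySem.Dict.getD (List.foldl (pvStep ds) PySem.Dict.empty xs) k []) pvSecond false).foldl
          (fun acc l => acc ++ [l.1]) acc
        = acc ++ PySem.List.sorted (xs.filter (fun i => decide (pvKo ds i = k))) (pvKt ds) false := by
    intro acc k hk
    have hkmem : k ∈ pvOccs ds xs := (PySem.List.mem_sorted _ _ _ _).1 hk
    rw [pvBuildGetD ds xs k hkmem (pvBuild_items ds xs)]
    have hmap : PySem.List.sorted (pvGrp ds xs k) pvSecond false =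
        (PySem.List.sorted (xs.filter (fun i => decide (pvKo ds i = k))) (pvKt ds) false).map (fun i => (i, pvKt ds i)) := by
      rw [pvGrp, pvSorted_map (fun i => (i, pvKt ds i)) pvSecond]
      rfl
    rw [hmap]
    rw [PySem.List.foldl_append_eq_flatMap (fun (l : Int × Int) => [l.1])]
    simp [List.flatMap_map, Function.comp]
  rw [PySem.List.foldl_congr_mem _ _ _ _ hbody]
  rw [PySem.List.foldl_append_eq_flatMap]
  simp

-- B's output, as a left fold of compound-key insertions
theorem pvB_char (ds : List (Int × List Int)) (xs : List Int) :
    Tri_indice_alt xs ds = xs.foldl (fun acc x => PySem.List.insertBy (pvLt2 ds) x acc) [] := rfl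

-- inserting an element with a NEW occurrence value into the flattened structure
theorem pvFlat_ins_notmem (ds : List (Int × List Int)) (x : Int) (B : Int → List Int) :
    ∀ ks : List Int, ks.Pairwise (· < ·) → (∀ k ∈ ks, ∀ a ∈ B k, pvKo ds a = k) → pvKo ds x ∉ ks →
    (PySem.List.insertBy (fun a b => decide (a < b)) (pvKo ds x) ks).flatMap
        (fun k => if k = pvKo ds x then [x] else B k)
      = PySem.List.insertBy (pvLt2 ds) x (ks.flatMap B) := by
  intro ks
  induction ks with
  | nil => intro _ _ _; simp [PySem.List.insertBy]
  | cons k ks ih =>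
    intro hpw hB hx
    have hxk : pvKo ds x ≠ k := fun h => hx (h ▸ List.mem_cons_self)
    have hxks : pvKo ds x ∉ ks := fun h => hx (List.mem_cons_of_mem _ h)
    have hklt := List.pairwise_cons.1 hpw
    have hcongr : List.flatMap (fun k' => if k' = pvKo ds x then [x] else B k') ks = List.flatMap B ks := by
      apply List.flatMap_congr
      intro k' hk'
      apply if_neg
      intro h
      subst h
      exact hxks hk'
    by_cases hlt : pvKo ds x < k
    · rw [PySem.List.insertBy]
      rw [if_pos (by simpa using hlt)]
      have hall : ∀ a ∈ (k :: ks).flatMap B, pvLt2 ds x a = true := by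
        intro a ha
        rcases List.mem_flatMap.1 ha with ⟨k', hk', ha'⟩
        have hka : pvKo ds a = k' := hB k' hk' a ha'
        have : pvKo ds x < k' := by
          rcases List.mem_cons.1 hk' with rfl | hk'
          · exact hlt
          · exact lt_trans hlt (hklt.1 k' hk')
        simp [pvLt2, hka, this]
      rw [pvInsertBy_all_true _ _ _ hall]
      simp only [List.flatMap_cons]
      simp [Ne.symm hxk, hcongr]
    · have hklt2 : k < pvKo ds x := lt_of_le_of_ne (not_lt.1 hlt) (Ne.symm hxk)
      rw [PySem.List.insertBy]
      rw [if_neg (by simpa using hlt)]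
      simp only [List.flatMap_cons]
      rw [if_neg (Ne.symm hxk)]
      rw [ih hklt.2 (fun k' hk' => hB k' (List.mem_cons_of_mem _ hk')) hxks]
      rw [pvInsertBy_append_all_false]
      intro a ha
      have hka : pvKo ds a = k := hB k List.mem_cons_self a ha
      simp [pvLt2, hka, hklt2, lt_asymm hklt2]

-- inserting an element with an EXISTING occurrence value into the flattened structure
theorem pvFlat_ins_mem (ds : List (Int × List Int)) (x : Int) (B : Int → List Int) :
    ∀ ks : List Int, ks.Pairwise (· < ·) → (∀ k ∈ ks, ∀ a ∈ B k, pvKo ds a = k) → pvKo ds x ∈ ks →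
    ks.flatMap (fun k => if k = pvKo ds x then
        PySem.List.insertBy (fun a b => decide (pvKt ds a < pvKt ds b)) x (B k) else B k)
      = PySem.List.insertBy (pvLt2 ds) x (ks.flatMap B) := by
  intro ks
  induction ks with
  | nil => intro _ _ h; simp at h
  | cons k ks ih =>
    intro hpw hB hx
    have hklt := List.pairwise_cons.1 hpw
    by_cases hk : k = pvKo ds x
    · subst hk
      have hxks : pvKo ds x ∉ ks := fun h => lt_irrefl _ (hklt.1 _ h)
      have hrest : ∀ a ∈ ks.flatMap B, pvLt2 ds x a = true := by
        intro a ha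
        rcases List.mem_flatMap.1 ha with ⟨k', hk', ha'⟩
        have hka : pvKo ds a = k' := hB k' (List.mem_cons_of_mem _ hk') a ha'
        have : pvKo ds x < k' := hklt.1 k' hk'
        simp [pvLt2, hka, this]
      simp only [List.flatMap_cons]
      rw [pvInsertBy_append_all_true_right _ _ _ _ hrest]
      have hcongr : List.flatMap (fun k' => if k' = pvKo ds x then
          PySem.List.insertBy (fun a b => decide (pvKt ds a < pvKt ds b)) x (B k') else B k') ks
          = List.flatMap B ks := by
        apply List.flatMap_congr
        intro k' hk'
        apply if_neg
        intro h
        subst h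
        exact hxks hk'
      rw [hcongr]
      have hins : PySem.List.insertBy (pvLt2 ds) x (B (pvKo ds x)) =
          PySem.List.insertBy (fun a b => decide (pvKt ds a < pvKt ds b)) x (B (pvKo ds x)) := by
        apply pvInsertBy_congr_mem
        intro a ha
        have hka : pvKo ds a = pvKo ds x := hB _ List.mem_cons_self a ha
        simp [pvLt2, hka]
      rw [hins]
      simp
    · have hxks : pvKo ds x ∈ ks := by
        rcases List.mem_cons.1 hx with h | h
        · exact absurd h.symm hk
        · exact h
      have hklt2 : k < pvKo ds x := hklt.1 _ hxks
      simp only [List.flatMap_cons]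
      rw [if_neg hk]
      rw [ih hklt.2 (fun k' hk' => hB k' (List.mem_cons_of_mem _ hk')) hxks]
      rw [pvInsertBy_append_all_false]
      intro a ha
      have hka : pvKo ds a = k := hB k List.mem_cons_self a ha
      simp [pvLt2, hka, hklt2, lt_asymm hklt2]

-- sorted distinct occurrences form a strictly increasing list
theorem pvSortedOccs_pairwise (ds : List (Int × List Int)) (xs : List Int) :
    (PySem.List.sorted (pvOccs ds xs) (fun k => k) false).Pairwise (· < ·) := by
  have hle : (PySem.List.sorted (pvOccs ds xs) (fun k => k) false).Pairwise (fun a b => a ≤ b) :=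
    PySem.List.sorted_pairwise (pvOccs ds xs) (fun k => k)
  have hnd : (PySem.List.sorted (pvOccs ds xs) (fun k => k) false).Nodup :=
    (PySem.List.sorted_perm (pvOccs ds xs) (fun k => k) false).nodup_iff.2 (pvOccs_nodup' ds xs)
  exact (hle.and hnd).imp (fun h => lt_of_le_of_ne h.1 h.2)

-- the per-occurrence blocks really carry that occurrence
theorem pvBlock_occ (ds : List (Int × List Int)) (xs : List Int) :
    ∀ k, ∀ a ∈ PySem.List.sorted (xs.filter (fun i => decide (pvKo ds i = k))) (pvKt ds) false, pvKo ds a = k := by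
  intro k a ha
  have := (PySem.List.mem_sorted _ _ _ _).1 ha
  simpa using (List.mem_filter.1 this).2

-- the heart of the matter: A's grouped flatten is B's single stable insertion sort
theorem pvMain (ds : List (Int × List Int)) (xs : List Int) :
    (PySem.List.sorted (pvOccs ds xs) (fun k => k) false).flatMap
        (fun o => PySem.List.sorted (xs.filter (fun i => decide (pvKo ds i = o))) (pvKt ds) false)
      = xs.foldl (fun acc x => PySem.List.insertBy (pvLt2 ds) x acc) [] := by
  induction xs using List.reverseRecOn with
  | nil => rfl
  | append_singleton xs x ih =>
    rw [List.foldl_append, List.foldl_cons, List.foldl_nil, ← ih]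
    have hocc : pvOccs ds (xs ++ [x]) =
        if pvKo ds x ∈ pvOccs ds xs then pvOccs ds xs else pvOccs ds xs ++ [pvKo ds x] := by
      simp [pvOccs, List.foldl_append]
    by_cases hmem : pvKo ds x ∈ pvOccs ds xs
    · rw [hocc, if_pos hmem]
      rw [← pvFlat_ins_mem ds x
        (fun o => PySem.List.sorted (xs.filter (fun i => decide (pvKo ds i = o))) (pvKt ds) false)
        (PySem.List.sorted (pvOccs ds xs) (fun k => k) false)
        (pvSortedOccs_pairwise ds xs) (fun k _ => pvBlock_occ ds xs k)
        ((PySem.List.mem_sorted _ _ _ _).2 hmem)]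
      apply List.flatMap_congr
      intro k hk
      by_cases hko : k = pvKo ds x
      · subst hko
        rw [if_pos rfl]
        have hfilter : (xs ++ [x]).filter (fun i => decide (pvKo ds i = pvKo ds x)) =
            xs.filter (fun i => decide (pvKo ds i = pvKo ds x)) ++ [x] := by
          simp [List.filter_append]
        rw [hfilter, PySem.List.sorted_eq_foldl_insertBy, PySem.List.sorted_eq_foldl_insertBy,
          List.foldl_append, List.foldl_cons, List.foldl_nil]
      · rw [if_neg hko]
        have : (xs ++ [x]).filter (fun i => decide (pvKo ds i = k)) =
            xs.filter (fun i => decide (pvKo ds i = k)) := by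
          simp [List.filter_append, Ne.symm hko]
        rw [this]
    · rw [hocc, if_neg hmem]
      have hsorted : PySem.List.sorted (pvOccs ds xs ++ [pvKo ds x]) (fun k => k) false =
          PySem.List.insertBy (fun a b => decide (a < b)) (pvKo ds x)
            (PySem.List.sorted (pvOccs ds xs) (fun k => k) false) := by
        rw [PySem.List.sorted_eq_foldl_insertBy, PySem.List.sorted_eq_foldl_insertBy,
          List.foldl_append, List.foldl_cons, List.foldl_nil]
      rw [hsorted]
      rw [← pvFlat_ins_notmem ds x
        (fun o => PySem.List.sorted (xs.filter (fun i => decide (pvKo ds i = o))) (pvKt ds) false)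
        (PySem.List.sorted (pvOccs ds xs) (fun k => k) false)
        (pvSortedOccs_pairwise ds xs) (fun k _ => pvBlock_occ ds xs k)
        (fun h => hmem ((PySem.List.mem_sorted _ _ _ _).1 h))]
      apply List.flatMap_congr
      intro k hk
      by_cases hko : k = pvKo ds x
      · subst hko
        rw [if_pos rfl]
        have hempty : xs.filter (fun i => decide (pvKo ds i = pvKo ds x)) = [] := by
          apply List.filter_eq_nil_iff.2
          intro i hi hdec
          exact hmem ((pvOccs_mem' ds xs _).2 ⟨i, hi, by simpa using hdec⟩)
        simp [List.filter_append, hempty, PySem.List.sorted, PySem.List.insertBy]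
      · rw [if_neg hko]
        have : (xs ++ [x]).filter (fun i => decide (pvKo ds i = k)) =
            xs.filter (fun i => decide (pvKo ds i = k)) := by
          simp [List.filter_append, Ne.symm hko]
        rw [this]

-- ===== VERDICT (by name: the statement is the Claim_ definition above) =====
theorem Tri_indice_spec : Claim_equal_Tri_indice := by
  intro lst_id dict_stat _ _
  unfold Spec_Tri_indice
  rw [pvA_char dict_stat lst_id, pvB_char dict_stat lst_id, pvMain]
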